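-- pv_equiv track=rewrite | github.com/CharlesBerthet/Pogrammation | Python/Listes/Exercice 5.py | retournement
-- ===== SOURCE A (Python) =====
-- def retournement(pile, k):
--     pile2 = []
--     pile3 = []
--     taille = len(pile)
--     for i in range(k, taille):
--         pile2.append(pile[i])
--     for i in range(k, taille):
--         pile3=[pile[i]]+pile3
--     return pile2 + pile3
-- ===== SOURCE B (Python) =====
-- def retournement(pile, k):
--     taille = len(pile)
--     m = taille - k
--     res = [None] * (2 * m)
--     for i in range(k, taille):
--         j = i - k
--         v = pile[i]
--         res[j] = v
--         res[2 * m - 1 - j] = v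
--     return res
-- ===== Notes on version B (the rewrite author's own statement) =====
-- stated objective: alternative
-- what changed: Instead of building the forward copy and the reversed copy in two separate loops (the second via repeated list prepending) and concatenating, B preallocates the full-size result and fills it symmetrically from both ends in a single pass over the indices.
import Mathlib
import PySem

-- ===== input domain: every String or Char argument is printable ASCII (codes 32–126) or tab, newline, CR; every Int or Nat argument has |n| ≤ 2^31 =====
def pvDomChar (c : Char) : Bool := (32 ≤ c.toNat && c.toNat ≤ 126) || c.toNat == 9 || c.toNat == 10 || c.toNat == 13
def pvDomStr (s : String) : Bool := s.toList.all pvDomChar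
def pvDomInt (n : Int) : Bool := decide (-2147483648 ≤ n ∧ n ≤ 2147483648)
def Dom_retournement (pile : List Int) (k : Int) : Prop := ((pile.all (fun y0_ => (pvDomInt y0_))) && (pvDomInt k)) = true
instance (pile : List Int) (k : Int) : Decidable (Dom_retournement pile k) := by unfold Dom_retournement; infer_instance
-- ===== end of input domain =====

-- B fills a preallocated result symmetrically from both ends in one pass instead of
-- A's two loops (append-copy, then prepend-reversed-copy) and concatenation.

-- ===== PORT A =====
-- two loops over range(k, taille): append pile[i] to pile2, prepend pile[i] to pile3;
-- pile[i] is pyGetD (in range for every admitted input, by Pre_)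
def retournement (pile : List Int) (k : Int) : List Int :=
  ((PySem.List.pyRange k pile.length 1).foldl
    (fun acc i => acc ++ [PySem.List.pyGetD pile i 0]) [])
  ++ ((PySem.List.pyRange k pile.length 1).foldl
    (fun acc i => [PySem.List.pyGetD pile i 0] ++ acc) [])

-- ===== PORT B =====
-- res = [None]*(2*m); one loop writes pile[i] at the mirror positions j = i-k and 2*m-1-j;
-- inside the loop both positions are ≥ 0, so .toNat is exact there
def retournement_alt (pile : List Int) (k : Int) : List Int :=
  (PySem.List.pyRange k pile.length 1).foldl
    (fun res i =>
      (res.set (i - k).toNat (PySem.List.pyGetD pile i 0)).set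
        (2 * ((pile.length : Int) - k) - 1 - (i - k)).toNat (PySem.List.pyGetD pile i 0))
    (List.replicate (2 * ((pile.length : Int) - k)).toNat (0 : Int))

-- ===== PRECONDITION & SPEC =====
-- Pre_ excludes k < -len(pile), where both Pythons raise IndexError on pile[k]
def Pre_retournement (pile : List Int) (k : Int) : Prop := -(pile.length : Int) ≤ k
instance (pile : List Int) (k : Int) : Decidable (Pre_retournement pile k) := by unfold Pre_retournement; infer_instance
def pvWitness_retournement : List Int × Int := ([1, 2, 3], 1)

def Spec_retournement (pile : List Int) (k : Int) (out : List Int) : Prop := out = retournement_alt pile k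
instance (pile : List Int) (k : Int) (out : List Int) : Decidable (Spec_retournement pile k out) := by unfold Spec_retournement; infer_instance

-- ===== CLAIM (what is proved, stated in full; the proofs are below) =====
def Claim_equal_retournement : Prop := ∀ (pile : List Int) (k : Int), Dom_retournement pile k → Pre_retournement pile k → Spec_retournement pile k (retournement pile k)

-- ===== LEMMAS AND PROOFS =====

-- A's first loop builds the map, the second builds its reverse
lemma foldl_append_eq_map (g : Int → Int) (l : List Int) :
    ∀ acc, l.foldl (fun acc i => acc ++ [g i]) acc = acc ++ l.map g := by
  induction l with
  | nil => simp
  | cons x xs ih => intro acc; simp [List.foldl, ih]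

lemma foldl_prepend_eq_reverse_map (g : Int → Int) (l : List Int) :
    ∀ acc, l.foldl (fun acc i => [g i] ++ acc) acc = (l.map g).reverse ++ acc := by
  induction l with
  | nil => simp
  | cons x xs ih => intro acc; simp [List.foldl, ih]

-- setting past a prefix
lemma set_append_right' (a rest : List Int) (p n : Nat) (v : Int) (h : p = a.length + n) :
    (a ++ rest).set p v = a ++ rest.set n v := by
  subst h
  induction a with
  | nil => simp
  | cons x xs ih => simpa [Nat.succ_add] using ih

-- setting right after a replicate prefix
lemma set_replicate_append (n : Nat) (x v : Int) (rest : List Int) :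
    (List.replicate n x ++ rest).set n v = List.replicate n x ++ rest.set 0 v := by
  exact set_append_right' _ _ n 0 v (by simp)

-- the symmetric-fill invariant: with prefix a (and its mirror b) already written and
-- 2*t zeros in the middle, the loop writes the remaining values and their reverse
lemma fill_spec (g : Int → Int) (k m : Int) :
    ∀ (t : Nat) (a b : List Int), m = a.length + t → b.length = a.length →
    (PySem.List.pyRange (k + a.length) (k + a.length + t) 1).foldl
      (fun res i => ((res.set (i - k).toNat (g i)).set (2 * m - 1 - (i - k)).toNat (g i)))
      (a ++ List.replicate (2 * t) (0 : Int) ++ b)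
    = a ++ ((PySem.List.pyRange (k + a.length) (k + a.length + t) 1).map g)
        ++ (((PySem.List.pyRange (k + a.length) (k + a.length + t) 1).map g).reverse) ++ b := by
  intro t
  induction t with
  | zero =>
      intro a b hm hb
      simp [PySem.List.pyRange_one_eq_nil (by omega : (k + (a.length : Int) + 0) ≤ k + a.length)]
  | succ t ih =>
      intro a b hm hb
      set kc : Int := k + a.length with hkc
      have hcons : PySem.List.pyRange kc (kc + (t + 1 : Nat)) 1
          = kc :: PySem.List.pyRange (kc + 1) (kc + (t + 1 : Nat)) 1 :=
        PySem.List.pyRange_one_cons (by push_cast; omega)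
      have hj : (kc - k).toNat = a.length + 0 := by omega
      have hj2 : (2 * m - 1 - (kc - k)).toNat = a.length + (2 * t + 1) := by omega
      have hrep : List.replicate (2 * (t + 1)) (0 : Int)
          = 0 :: (List.replicate (2 * t) (0 : Int) ++ [0]) := by
        have h1 : 2 * (t + 1) = (2 * t + 1) + 1 := by omega
        rw [h1, List.replicate_succ, List.replicate_add]
        simp
      -- effect of the first iteration on the state
      have hstate :
          (((a ++ List.replicate (2 * (t + 1)) (0 : Int) ++ b).set (kc - k).toNat (g kc)).set
              (2 * m - 1 - (kc - k)).toNat (g kc))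
          = (a ++ [g kc]) ++ List.replicate (2 * t) (0 : Int) ++ (g kc :: b) := by
        rw [List.append_assoc,
          set_append_right' a _ _ 0 (g kc) (by omega),
          set_append_right' a _ _ (2 * t + 1) (g kc) (by omega),
          hrep]
        simp only [List.set_cons_zero, List.cons_append, List.set_cons_succ, List.append_assoc]
        rw [set_replicate_append]
        simp
      rw [hcons]
      simp only [List.foldl_cons]
      rw [hstate]
      have hr := ih (a ++ [g kc]) (g kc :: b) (by simp; omega) (by simp [hb])
      have hlen : k + ((a ++ [g kc]).length : Int) = kc + 1 := by
        simp [hkc]; push_cast; ring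
      rw [hlen] at hr
      have hend : kc + 1 + (t : Int) = kc + ((t : Nat) + 1 : Nat) := by push_cast; ring
      rw [show ((t : Nat) : Int) = (t : Int) from rfl, hend] at hr
      rw [hr, List.map_cons]
      simp

-- closed form of each port
lemma retournement_eq (pile : List Int) (k : Int) :
    retournement pile k
    = ((PySem.List.pyRange k pile.length 1).map (fun i => PySem.List.pyGetD pile i 0))
      ++ ((PySem.List.pyRange k pile.length 1).map (fun i => PySem.List.pyGetD pile i 0)).reverse := by
  unfold retournement
  rw [foldl_append_eq_map, foldl_prepend_eq_reverse_map]
  simp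

lemma retournement_alt_eq (pile : List Int) (k : Int) :
    retournement_alt pile k
    = ((PySem.List.pyRange k pile.length 1).map (fun i => PySem.List.pyGetD pile i 0))
      ++ ((PySem.List.pyRange k pile.length 1).map (fun i => PySem.List.pyGetD pile i 0)).reverse := by
  unfold retournement_alt
  by_cases h : (pile.length : Int) ≤ k
  · simp [PySem.List.pyRange_one_eq_nil h,
      Int.toNat_of_nonpos (by omega : 2 * ((pile.length : Int) - k) ≤ 0)]
  · set g : Int → Int := fun i => PySem.List.pyGetD pile i 0 with hg
    have hr := fill_spec g k ((pile.length : Int) - k) ((pile.length : Int) - k).toNat [] [] (by simp; omega) rfl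
    simp only [List.length_nil, Int.natCast_zero, List.nil_append, List.append_nil, add_zero] at hr
    rw [show k + ((((pile.length : Int) - k).toNat : Nat) : Int) = (pile.length : Int) by omega] at hr
    rw [show (2 * ((pile.length : Int) - k)).toNat = 2 * ((pile.length : Int) - k).toNat by omega]
    exact hr

-- ===== VERDICT (by name: the statement is the Claim_ definition above) =====
theorem retournement_spec : Claim_equal_retournement := by
  intro pile k _ _
  unfold Spec_retournement
  rw [retournement_eq, retournement_alt_eq]
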